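-- pv_equiv track=rewrite | github.com/DaftCode101/De-Bruijn | graph.py | produce_sub_arrays
-- ===== SOURCE A (Python) =====
-- def produce_sub_arrays(arr) -> list:
--     sub = []
--     for i in range(len(arr)):
--         sub_arr = []
--         for j in range(0, i):
--             x = []
--             for s in range(0, i):
--                 x.append(arr[j][s])
--             for s in range(i + 1, len(arr)):
--                 x.append(arr[j][s])
--             sub_arr.append(x)
--         for j in range(i + 1, len(arr)):
--             x = []
--             for s in range(0, i):
--                 x.append(arr[j][s])
--             for s in range(i + 1, len(arr)):
--                 x.append(arr[j][s])
--             sub_arr.append(x)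
--         sub.append(sub_arr)
--     return sub
-- ===== SOURCE B (Python) =====
-- def _strip(row, i, n):
--     return row[:i] + row[i + 1:n]
--
--
-- def produce_sub_arrays(arr) -> list:
--     # Transposed traversal: one pass over the rows, distributing each
--     # column-reduced row into every minor it belongs to.
--     n = len(arr)
--     minors = [[] for _ in range(n)]
--     for j, row in enumerate(arr):
--         for i in range(n):
--             if i != j:
--                 minors[i].append(_strip(row, i, n))
--     return minors
-- ===== Notes on version B (the rewrite author's own statement) =====
-- stated objective: alternative
-- what changed: B transposes the loop nest: instead of A's per-minor triple loop that copies each surviving row element by element with split index ranges, B makes one pass over the rows, slicing column i out of each row (row[:i]+row[i+1:n]) and distributing the reduced row into every minor but its own, building all n minors simultaneously.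
import Mathlib
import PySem

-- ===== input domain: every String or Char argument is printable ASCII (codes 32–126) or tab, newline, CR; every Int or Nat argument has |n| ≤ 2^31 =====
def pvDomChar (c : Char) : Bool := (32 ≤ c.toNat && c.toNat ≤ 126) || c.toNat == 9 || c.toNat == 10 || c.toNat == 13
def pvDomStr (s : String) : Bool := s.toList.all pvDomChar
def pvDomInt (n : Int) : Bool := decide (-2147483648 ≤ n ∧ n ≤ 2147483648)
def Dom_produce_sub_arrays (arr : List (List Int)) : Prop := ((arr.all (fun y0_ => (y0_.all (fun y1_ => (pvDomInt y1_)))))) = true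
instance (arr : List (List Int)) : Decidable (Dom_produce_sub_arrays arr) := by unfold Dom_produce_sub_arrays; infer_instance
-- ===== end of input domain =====

-- B transposes the loop nest: one pass over the rows, slicing column i out of each row and
-- distributing the reduced row into every minor but its own; objective: alternative, same cost.

-- ===== PORT A =====
-- literal transliteration: range(a, b) with step 1 is List.range' a (b - a);
-- arr[j][s] is in range under Pre_, ported as getD (exact on Pre_).
def produce_sub_arrays (arr : List (List Int)) : List (List (List Int)) :=
  (List.range arr.length).foldl (fun sub i =>
    let sub_arr :=
      (List.range i).foldl (fun sub_arr j =>
        let x := (List.range i).foldl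
                   (fun x s => x ++ [(arr.getD j []).getD s 0]) []
        let x := (List.range' (i + 1) (arr.length - (i + 1))).foldl
                   (fun x s => x ++ [(arr.getD j []).getD s 0]) x
        sub_arr ++ [x]) []
    let sub_arr :=
      (List.range' (i + 1) (arr.length - (i + 1))).foldl (fun sub_arr j =>
        let x := (List.range i).foldl
                   (fun x s => x ++ [(arr.getD j []).getD s 0]) []
        let x := (List.range' (i + 1) (arr.length - (i + 1))).foldl
                   (fun x s => x ++ [(arr.getD j []).getD s 0]) x
        sub_arr ++ [x]) sub_arr
    sub ++ [sub_arr]) []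

-- ===== PORT B =====
-- helper _strip(row, i, n) = row[:i] + row[i+1:n]
def pvStrip (row : List Int) (i : Nat) (n : Nat) : List Int :=
  PySem.List.slice row none (some (i : Int)) ++
    PySem.List.slice row (some ((i : Int) + 1)) (some (n : Int))

-- minors = [[] for _ in range(n)]; for j, row in enumerate(arr): for i in range(n):
--   if i != j: minors[i].append(_strip(row, i, n)); the in-place append is List.modify.
def produce_sub_arrays_alt (arr : List (List Int)) : List (List (List Int)) :=
  let n := arr.length
  let minors : List (List (List Int)) := (List.range n).map (fun _ => [])
  (PySem.List.enumerate arr).foldl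
    (fun minors p =>
      (List.range n).foldl
        (fun minors (i : Nat) =>
          if (i : Int) ≠ p.1 then minors.modify i (fun m => m ++ [pvStrip p.2 i n])
          else minors)
        minors)
    minors

-- ===== PRECONDITION & SPEC =====
-- Pre_ is exactly the set of inputs on which the Python A returns (elsewhere A raises
-- IndexError on a row too short for its element-by-element copying; B, which slices, never raises).
def Pre_produce_sub_arrays (arr : List (List Int)) : Prop :=
  arr.length ≤ 1 ∨
    (arr.length = 2 ∧ 1 ≤ (arr.getD 0 []).length ∧ 2 ≤ (arr.getD 1 []).length) ∨
    ∀ row ∈ arr, arr.length ≤ row.length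
instance (arr : List (List Int)) : Decidable (Pre_produce_sub_arrays arr) := by
  unfold Pre_produce_sub_arrays; infer_instance
def pvWitness_produce_sub_arrays : List (List Int) := [[1, 2], [3, 4]]
def Spec_produce_sub_arrays (arr : List (List Int)) (out : List (List (List Int))) : Prop := out = produce_sub_arrays_alt arr
instance (arr : List (List Int)) (out : List (List (List Int))) : Decidable (Spec_produce_sub_arrays arr out) := by unfold Spec_produce_sub_arrays; infer_instance

-- ===== CLAIM (what is proved, stated in full; the proofs are below) =====
def Claim_equal_produce_sub_arrays : Prop := ∀ (arr : List (List Int)), Dom_produce_sub_arrays arr → Pre_produce_sub_arrays arr → Spec_produce_sub_arrays arr (produce_sub_arrays arr)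

-- ===== LEMMAS AND PROOFS =====

-- the j-index list A visits for minor i is the filtered range B's per-row test produces
theorem pv_filter_range_ne (i n : Nat) (h : i < n) :
    (List.range n).filter (fun s => decide (s ≠ i)) =
      List.range i ++ List.range' (i + 1) (n - (i + 1)) := by
  induction n with
  | zero => omega
  | succ m ih =>
    rw [List.range_succ, List.filter_append]
    rcases Nat.lt_or_ge i m with hi | hi
    · rw [ih hi]
      have e1 : m + 1 - (i + 1) = (m - (i + 1)) + 1 := by omega
      have e2 : (i + 1) + (m - (i + 1)) = m := by omega
      rw [e1, List.range'_1_concat, e2]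
      simp only [List.filter_cons, List.filter_nil, decide_eq_true_eq, ne_eq,
        ite_not, List.append_assoc]
      split
      · omega
      · rfl
    · have : i = m := by omega
      subst this
      have h1 : (List.range i).filter (fun s => decide (s ≠ i)) = List.range i := by
        apply List.filter_eq_self.mpr
        intro a ha
        simp only [List.mem_range] at ha
        simp only [ne_eq, decide_eq_true_eq]
        omega
      have h2 : (List.filter (fun s => decide (s ≠ i)) [i]) = [] := by simp
      rw [h1, h2, List.append_nil]
      simp

theorem pv_take_eq_map_range (l : List Int) (i : Nat) (h : i ≤ l.length) :
    l.take i = (List.range i).map (fun j => l.getD j 0) := by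
  apply List.ext_getElem
  · simp; omega
  · intro k h1 h2
    simp only [List.getElem_take, List.getElem_map, List.getElem_range]
    have hk : k < l.length := by simp at h1; omega
    rw [List.getD_eq_getElem l 0 hk]

theorem pv_drop_take_eq_map_range' (l : List Int) (i n : Nat)
    (h : n ≤ l.length ∨ n ≤ i + 1) :
    (l.drop (i + 1)).take (n - (i + 1)) =
      (List.range' (i + 1) (n - (i + 1))).map (fun j => l.getD j 0) := by
  apply List.ext_getElem
  · simp; omega
  · intro k h1 h2
    simp only [List.getElem_take, List.getElem_drop, List.getElem_map, List.getElem_range']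
    have hk : i + 1 + k < l.length := by simp at h1; omega
    have h3 : i + 1 + 1 * k = i + 1 + k := by ring
    rw [h3, List.getD_eq_getElem l 0 hk]

-- B's helper equals A's element-by-element row copy, given the row is long enough
theorem pv_strip_eq (row : List Int) (k n : Nat) (hk : k ≤ row.length)
    (h : n ≤ row.length ∨ n ≤ k + 1) :
    pvStrip row k n =
      (List.range k).map (fun s => row.getD s 0) ++
        (List.range' (k + 1) (n - (k + 1))).map (fun s => row.getD s 0) := by
  unfold pvStrip
  have e1 : ((k : Int) + 1) = ((k + 1 : Nat) : Int) := by push_cast; ring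
  rw [PySem.List.slice_to_natCast, e1, PySem.List.slice_natCast,
    pv_take_eq_map_range row k hk, pv_drop_take_eq_map_range' row k n h]

-- A as a map over the minors' indices
theorem pv_A_char (arr : List (List Int)) :
    produce_sub_arrays arr =
      (List.range arr.length).map (fun i =>
        (List.range i).map (fun j =>
          (List.range i).map (fun s => (arr.getD j []).getD s 0) ++
            (List.range' (i + 1) (arr.length - (i + 1))).map
              (fun s => (arr.getD j []).getD s 0)) ++
        (List.range' (i + 1) (arr.length - (i + 1))).map (fun j =>
          (List.range i).map (fun s => (arr.getD j []).getD s 0) ++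
            (List.range' (i + 1) (arr.length - (i + 1))).map
              (fun s => (arr.getD j []).getD s 0))) := by
  simp only [produce_sub_arrays, PySem.List.foldl_append_singleton_eq_map, List.nil_append]

-- elementwise effect of B's inner loop over minors' indices (one row distributed)
theorem pv_inner_getElem? (n m : Nat) (ms : List (List (List Int))) (j : Int)
    (row : List Int) (k : Nat) :
    ((List.range m).foldl
        (fun ms (i : Nat) => if (i : Int) ≠ j then ms.modify i (fun x => x ++ [pvStrip row i n])
          else ms) ms)[k]? =
      (fun x => if (k : Int) ≠ j ∧ k < m then x ++ [pvStrip row k n] else x) <$> ms[k]? := by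
  induction m generalizing ms with
  | zero =>
    simp only [List.range_zero, List.foldl_nil]
    cases ms[k]? <;> simp
  | succ m ih =>
    rw [List.range_succ, List.foldl_append, List.foldl_cons, List.foldl_nil]
    by_cases hm : (m : Int) ≠ j
    · rw [if_pos hm, List.getElem?_modify, ih]
      cases hms : ms[k]? with
      | none => rfl
      | some x =>
        simp only [Option.map_eq_map, Option.map_some, Option.some.injEq]
        by_cases hmk : m = k
        · subst hmk
          split_ifs <;> first | rfl | omega
        · split_ifs <;> first | rfl | omega
    · rw [if_neg hm, ih]
      cases hms : ms[k]? with
      | none => rfl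
      | some x =>
        simp only [Option.map_eq_map, Option.map_some, Option.some.injEq]
        by_cases hmk : m = k
        · subst hmk
          split_ifs <;> first | rfl | omega
        · split_ifs <;> first | rfl | omega

-- elementwise effect of B's outer loop (all rows distributed)
theorem pv_outer_getElem? (n : Nat) (rows : List (List Int)) :
    ∀ (s : Int) (ms : List (List (List Int))) (k : Nat), k < n →
    ((PySem.List.enumerate rows s).foldl
        (fun ms p =>
          (List.range n).foldl
            (fun ms (i : Nat) => if (i : Int) ≠ p.1 then ms.modify i (fun x => x ++ [pvStrip p.2 i n])
              else ms) ms) ms)[k]? =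
      (fun x => x ++ ((PySem.List.enumerate rows s).filter
          (fun p => p.1 ≠ (k : Int))).map (fun p => pvStrip p.2 k n)) <$> ms[k]? := by
  induction rows with
  | nil =>
    intro s ms k hk
    cases hms : ms[k]? <;> simp [PySem.List.enumerate, hms]
  | cons r rows ih =>
    intro s ms k hk
    rw [PySem.List.enumerate_cons, List.foldl_cons, ih _ _ k hk, pv_inner_getElem?,
      List.filter_cons]
    cases hms : ms[k]? with
    | none => rfl
    | some x =>
      by_cases hks : (k : Int) = s
      · have h1 : ¬ ((k : Int) ≠ s ∧ k < n) := by tauto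
        have h2 : ¬ ((s, r).1 ≠ (k : Int)) := by simp [hks]
        simp [h1, h2]
      · have h1 : ((k : Int) ≠ s ∧ k < n) := ⟨hks, hk⟩
        have h2 : ((s, r).1 ≠ (k : Int)) := by
          simp only [ne_eq]
          exact fun e => hks (by omega)
        simp [h1, h2]

-- enumerate(arr) lists exactly the pairs (j, arr[j])
theorem pv_enum_eq (xs : List (List Int)) :
    ∀ (s : Nat), PySem.List.enumerate xs (s : Int) =
      (List.range xs.length).map (fun j => (((s + j : Nat) : Int), xs.getD j [])) := by
  induction xs with
  | nil => intro s; simp [PySem.List.enumerate]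
  | cons x xs ih =>
    intro s
    rw [PySem.List.enumerate_cons]
    have e1 : ((s : Int) + 1) = ((s + 1 : Nat) : Int) := by push_cast; ring
    rw [e1, ih (s + 1)]
    rw [List.length_cons, List.range_succ_eq_map, List.map_cons, List.map_map]
    congr 1
    apply List.map_congr_left
    intro j _
    simp only [Function.comp_apply, Nat.succ_eq_add_one, List.getD_cons_succ,
      Prod.mk.injEq]
    refine ⟨?_, trivial⟩
    push_cast
    ring

-- B's folds never change the number of minors
theorem pv_fold_length (n : Nat) (rows : List (Int × List Int)) :
    ∀ ms : List (List (List Int)),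
      (rows.foldl
          (fun ms p =>
            (List.range n).foldl
              (fun ms (i : Nat) => if (i : Int) ≠ p.1 then ms.modify i (fun x => x ++ [pvStrip p.2 i n])
                else ms) ms) ms).length = ms.length := by
  induction rows with
  | nil => intro ms; rfl
  | cons p ps ihp =>
    intro ms
    rw [List.foldl_cons, ihp]
    induction List.range n generalizing ms with
    | nil => rfl
    | cons i q ihq =>
      rw [List.foldl_cons, ihq]
      split <;> simp [List.length_modify]

-- B as a map over the minors' indices
theorem pv_B_char (arr : List (List Int)) :
    produce_sub_arrays_alt arr =
      (List.range arr.length).map (fun k =>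
        ((List.range arr.length).filter (fun j => decide (j ≠ k))).map
          (fun j => pvStrip (arr.getD j []) k arr.length)) := by
  have hlen : (produce_sub_arrays_alt arr).length = arr.length := by
    simp only [produce_sub_arrays_alt]
    rw [pv_fold_length]
    simp
  apply List.ext_getElem?
  intro k
  rcases Nat.lt_or_ge k arr.length with hk | hk
  · have hrhs : ((List.range arr.length).map (fun k =>
        ((List.range arr.length).filter (fun j => decide (j ≠ k))).map
          (fun j => pvStrip (arr.getD j []) k arr.length)))[k]? =
        some (((List.range arr.length).filter (fun j => decide (j ≠ k))).map
          (fun j => pvStrip (arr.getD j []) k arr.length)) := by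
      rw [List.getElem?_map]
      simp [hk]
    rw [hrhs]
    simp only [produce_sub_arrays_alt]
    rw [pv_outer_getElem? arr.length arr 0 _ k hk]
    have hinit : ((List.range arr.length).map
        (fun _ => ([] : List (List Int))))[k]? = some [] := by
      rw [List.getElem?_map]
      simp [hk]
    rw [hinit]
    have e0 : (0 : Int) = ((0 : Nat) : Int) := rfl
    rw [e0, pv_enum_eq arr 0]
    simp only [Option.map_eq_map, Option.map_some, List.nil_append, Option.some.injEq]
    rw [List.filter_map, List.map_map]
    have hfil : ((fun (p : Int × List Int) => decide (p.1 ≠ (k : Int))) ∘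
        (fun j => (((0 + j : Nat) : Int), arr.getD j []))) = (fun j => decide (j ≠ k)) := by
      funext j
      simp only [Function.comp_apply]
      by_cases hjk : j = k
      · subst hjk; simp
      · have h1 : ((0 + j : Nat) : Int) ≠ (k : Int) := by omega
        simp [hjk]
    rw [hfil]
    apply List.map_congr_left
    intro j _
    rfl
  · rw [List.getElem?_eq_none (by rw [hlen]; omega),
      List.getElem?_eq_none (by simp; omega)]

-- the per-index length facts Pre_ gives for every (minor k, row j) pair A touches
theorem pv_pre_cond (arr : List (List Int)) (h : Pre_produce_sub_arrays arr)
    (k j : Nat) (hk : k < arr.length) (hj : j < arr.length) (hjk : j ≠ k) :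
    k ≤ (arr.getD j []).length ∧
      (arr.length ≤ (arr.getD j []).length ∨ arr.length ≤ k + 1) := by
  rcases h with h | ⟨h2, ha, hb⟩ | h
  · omega
  · have hj2 : j < 2 := by omega
    interval_cases j
    · exact ⟨by omega, Or.inr (by omega)⟩
    · exact ⟨by omega, Or.inl (by omega)⟩
  · have hmem : arr.getD j [] ∈ arr := by
      rw [List.getD_eq_getElem arr [] hj]
      exact List.getElem_mem hj
    have := h _ hmem
    exact ⟨by omega, Or.inl this⟩

theorem produce_sub_arrays_eq (arr : List (List Int))
    (h : Pre_produce_sub_arrays arr) :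
    produce_sub_arrays arr = produce_sub_arrays_alt arr := by
  rw [pv_A_char, pv_B_char]
  apply List.map_congr_left
  intro k hk
  simp only [List.mem_range] at hk
  rw [pv_filter_range_ne k arr.length hk, List.map_append]
  have hrow : ∀ j, j < arr.length → j ≠ k →
      pvStrip (arr.getD j []) k arr.length =
        (List.range k).map (fun s => (arr.getD j []).getD s 0) ++
          (List.range' (k + 1) (arr.length - (k + 1))).map
            (fun s => (arr.getD j []).getD s 0) := by
    intro j hj hjk
    obtain ⟨c1, c2⟩ := pv_pre_cond arr h k j hk hj hjk
    exact pv_strip_eq _ _ _ c1 c2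
  congr 1
  · apply List.map_congr_left
    intro j hj
    simp only [List.mem_range] at hj
    exact (hrow j (by omega) (by omega)).symm
  · apply List.map_congr_left
    intro j hj
    simp only [List.mem_range'_1] at hj
    exact (hrow j (by omega) (by omega)).symm

-- ===== VERDICT (by name: the statement is the Claim_ definition above) =====
theorem produce_sub_arrays_spec : Claim_equal_produce_sub_arrays := by
  intro arr _ hpre
  unfold Spec_produce_sub_arrays
  exact produce_sub_arrays_eq arr hpre
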